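-- pv_equiv track=rewrite | github.com/yatian-skyler-li/Enigma | test_caesar.py | caesarKey
-- ===== SOURCE A (Python) =====
-- import string
--
-- def caesarKey(shift):
--     keys = {} #use dictionary for letter mapping
--     invkeys = {} #use dictionary for inverse letter mapping, you could use inverse search from original dict
--     for index, letter in enumerate(letters):
--         # cypher setup
--         if index < totalLetters: #lowercase
--             #INSERT CODE HERE
--             keys[letter] = letters[(index + shift)%totalLetters]
--             invkeys[letter] = letters[(index - shift)%totalLetters]
--
--         else: #uppercase
--             #INSERT CODE HERE
--             keys[letter] = letters[(index + shift)%totalLetters + totalLetters]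
--             invkeys[letter] = letters[(index - shift)%totalLetters + totalLetters]
--     return keys, invkeys
--
-- letters = string.ascii_letters #contains 'abcdefghijklmnopqrstuvwxyzABCDEFGHIJKLMNOPQRSTUVWXYZ'
--
-- totalLetters = 26
-- ===== SOURCE B (Python) =====
-- import string
--
-- def caesarKey(shift):
--     s = shift % 26
--     si = (-shift) % 26
--     lower = string.ascii_lowercase
--     upper = string.ascii_uppercase
--     keys = dict(zip(lower + upper,
--                     lower[s:] + lower[:s] + upper[s:] + upper[:s]))
--     invkeys = dict(zip(lower + upper,
--                        lower[si:] + lower[:si] + upper[si:] + upper[:si]))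
--     return keys, invkeys
-- ===== Notes on version B (the rewrite author's own statement) =====
-- stated objective: simpler
-- what changed: Replaces the per-letter enumerate loop with lowercase/uppercase branch and (index±shift)%26 indexing by computing the two rotated alphabets once via slicing (lower[s:]+lower[:s] with s = shift%26, si = (-shift)%26) and zipping them against the plain alphabet.
import Mathlib
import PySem

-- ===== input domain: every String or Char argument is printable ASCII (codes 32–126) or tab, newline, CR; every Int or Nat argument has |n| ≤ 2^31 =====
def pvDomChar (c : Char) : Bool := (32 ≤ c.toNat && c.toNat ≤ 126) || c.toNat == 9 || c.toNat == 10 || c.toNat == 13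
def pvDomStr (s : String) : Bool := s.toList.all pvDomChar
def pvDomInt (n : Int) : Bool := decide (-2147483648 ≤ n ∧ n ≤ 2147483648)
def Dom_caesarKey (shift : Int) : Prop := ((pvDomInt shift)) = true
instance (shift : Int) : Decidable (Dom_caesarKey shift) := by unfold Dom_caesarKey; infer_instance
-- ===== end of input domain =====

-- B builds the mappings by slicing two rotated alphabets and zipping, instead of A's
-- per-letter loop with a case split and (index±shift)%26 indexing; return-value equivalence only.

-- ===== PORT A =====
-- module constant: letters = string.ascii_letters
def pvLetters : List Char :=
  "abcdefghijklmnopqrstuvwxyzABCDEFGHIJKLMNOPQRSTUVWXYZ".toList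

-- one iteration of A's for-loop (letters[...] indexing is always in range, so pyGetD's
-- default 'a' is never used; exact for the in-range indices this program produces)
def caesarKeyStep (shift : Int)
    (st : PySem.Dict String String × PySem.Dict String String)
    (p : Int × Char) : PySem.Dict String String × PySem.Dict String String :=
  let index := p.1
  let letter := p.2
  if index < 26 then
    (st.1.insert (String.singleton letter)
        (String.singleton (PySem.List.pyGetD pvLetters (PySem.Int.mod (index + shift) 26) 'a')),
     st.2.insert (String.singleton letter)
        (String.singleton (PySem.List.pyGetD pvLetters (PySem.Int.mod (index - shift) 26) 'a')))
  else
    (st.1.insert (String.singleton letter)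
        (String.singleton (PySem.List.pyGetD pvLetters (PySem.Int.mod (index + shift) 26 + 26) 'a')),
     st.2.insert (String.singleton letter)
        (String.singleton (PySem.List.pyGetD pvLetters (PySem.Int.mod (index - shift) 26 + 26) 'a')))

def caesarKey (shift : Int) : (List (String × String)) × (List (String × String)) :=
  let res := (PySem.List.enumerate pvLetters 0).foldl (caesarKeyStep shift)
      ((PySem.Dict.empty : PySem.Dict String String), (PySem.Dict.empty : PySem.Dict String String))
  (res.1.items, res.2.items)

-- ===== PORT B =====
def pvLower : List Char := "abcdefghijklmnopqrstuvwxyz".toList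
def pvUpper : List Char := "ABCDEFGHIJKLMNOPQRSTUVWXYZ".toList

-- t[k:] + t[:k]
def pvRot (t : List Char) (k : Int) : List Char :=
  PySem.List.slice t (some k) none ++ PySem.List.slice t none (some k)

-- dict(zip(keys, vals)) with all keys distinct: its items are exactly the zip list
def pvZipS (ks vs : List Char) : List (String × String) :=
  (ks.zip vs).map (fun q => (String.singleton q.1, String.singleton q.2))

def caesarKey_alt (shift : Int) : (List (String × String)) × (List (String × String)) :=
  let s := PySem.Int.mod shift 26
  let si := PySem.Int.mod (-shift) 26
  (pvZipS (pvLower ++ pvUpper) (pvRot pvLower s ++ pvRot pvUpper s),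
   pvZipS (pvLower ++ pvUpper) (pvRot pvLower si ++ pvRot pvUpper si))

-- ===== PRECONDITION & SPEC =====
def Spec_caesarKey (shift : Int) (out : (List (String × String)) × (List (String × String))) : Prop := out = caesarKey_alt shift
instance (shift : Int) (out : (List (String × String)) × (List (String × String))) : Decidable (Spec_caesarKey shift out) := by unfold Spec_caesarKey; infer_instance

-- ===== CLAIM (what is proved, stated in full; the proofs are below) =====
def Claim_equal_caesarKey : Prop := ∀ (shift : Int), Dom_caesarKey shift → Spec_caesarKey shift (caesarKey shift)

-- ===== LEMMAS AND PROOFS =====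

-- arithmetic: A's modular indices depend on shift only through its residue
lemma pv_mod_pos (a : Int) : PySem.Int.mod a 26 = a % 26 :=
  PySem.Int.mod_eq_emod_of_pos (by norm_num)

-- A's step updates the two dicts componentwise, always at key singleton p.2
def pvValK (shift : Int) (a : Int × Char) : String :=
  String.singleton (PySem.List.pyGetD pvLetters
    (if a.1 < 26 then PySem.Int.mod (a.1 + shift) 26 else PySem.Int.mod (a.1 + shift) 26 + 26) 'a')

def pvValI (shift : Int) (a : Int × Char) : String :=
  String.singleton (PySem.List.pyGetD pvLetters
    (if a.1 < 26 then PySem.Int.mod (a.1 - shift) 26 else PySem.Int.mod (a.1 - shift) 26 + 26) 'a')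

lemma pv_step_eq (shift : Int) (st : PySem.Dict String String × PySem.Dict String String)
    (p : Int × Char) :
    caesarKeyStep shift st p =
      (st.1.insert (String.singleton p.2) (pvValK shift p),
       st.2.insert (String.singleton p.2) (pvValI shift p)) := by
  by_cases h : p.1 < 26 <;> simp [caesarKeyStep, pvValK, pvValI, h]

lemma pv_foldl_pair (shift : Int) (l : List (Int × Char))
    (st : PySem.Dict String String × PySem.Dict String String) :
    l.foldl (caesarKeyStep shift) st =
      (l.foldl (fun d a => d.insert (String.singleton a.2) (pvValK shift a)) st.1,
       l.foldl (fun d a => d.insert (String.singleton a.2) (pvValI shift a)) st.2) := by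
  induction l generalizing st with
  | nil => rfl
  | cons a l ih =>
    rw [List.foldl_cons, pv_step_eq, ih]
    rfl

lemma pv_singleton_injective : Function.Injective String.singleton := by
  intro a b h
  have := congrArg String.toList h
  simpa using this

lemma pv_keys_nodup :
    (((PySem.List.enumerate pvLetters 0).map (fun a => String.singleton a.2))).Nodup := by
  have h : ((PySem.List.enumerate pvLetters 0).map (fun a => String.singleton a.2))
      = (((PySem.List.enumerate pvLetters 0).map (·.2)).map String.singleton) := by
    rw [List.map_map]; rfl
  rw [h, PySem.List.map_snd_enumerate]
  exact (by decide : pvLetters.Nodup).map pv_singleton_injective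

lemma pv_items_fold (v : (Int × Char) → String) :
    (((PySem.List.enumerate pvLetters 0).foldl
        (fun d a => d.insert (String.singleton a.2) (v a))
        (PySem.Dict.empty : PySem.Dict String String))).items =
      (PySem.List.enumerate pvLetters 0).map (fun a => (String.singleton a.2, v a)) := by
  rw [PySem.Dict.items_foldl_insert_fresh]
  · rfl
  · intro a _; simp
  · exact pv_keys_nodup

lemma pv_letters_split : pvLetters = pvLower ++ pvUpper := by decide

lemma pv_low_len : pvLower.length = 26 := by decide
lemma pv_up_len : pvUpper.length = 26 := by decide
lemma pv_let_len : pvLetters.length = 52 := by decide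

lemma pv_low_get? (m : Nat) (hm : m < 26) : pvLower[m]? = pvLetters[m]? := by
  rw [pv_letters_split, List.getElem?_append_left (by rw [pv_low_len]; omega)]

lemma pv_up_get? (m : Nat) (hm : m < 26) : pvUpper[m]? = pvLetters[m + 26]? := by
  rw [pv_letters_split, List.getElem?_append_right (by rw [pv_low_len]; omega), pv_low_len]
  congr 1

-- the rotated alphabet, read at position k, is the alphabet at (k+n) mod 26
lemma pv_rot_get? (t : List Char) (ht : t.length = 26) (n k : Nat) (hn : n < 26) (hk : k < 26) :
    (t.drop n ++ t.take n)[k]? = t[(k + n) % 26]? := by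
  by_cases h : k < 26 - n
  · rw [List.getElem?_append_left (by simp [ht]; omega), List.getElem?_drop]
    congr 1
    omega
  · rw [List.getElem?_append_right (by simp [ht]; omega)]
    have hl : (t.drop n).length = 26 - n := by simp [ht]
    rw [hl, List.getElem?_take_of_lt (by omega)]
    congr 1
    omega

set_option maxHeartbeats 1000000 in
lemma pv_map_eq (e : Int → Int) (n : Nat) (hn : n < 26)
    (hm : ∀ j : Int, PySem.Int.mod (e j) 26 = (j + n) % 26) :
    (PySem.List.enumerate pvLetters 0).map
        (fun a => (String.singleton a.2,
          String.singleton (PySem.List.pyGetD pvLetters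
            (if a.1 < 26 then PySem.Int.mod (e a.1) 26 else PySem.Int.mod (e a.1) 26 + 26) 'a')))
      = pvZipS (pvLower ++ pvUpper) (pvRot pvLower (n : Int) ++ pvRot pvUpper (n : Int)) := by
  have hrotL : (pvRot pvLower (n : Int)) = pvLower.drop n ++ pvLower.take n := by
    simp [pvRot, PySem.List.slice_from_natCast, PySem.List.slice_to_natCast]
  have hrotU : (pvRot pvUpper (n : Int)) = pvUpper.drop n ++ pvUpper.take n := by
    simp [pvRot, PySem.List.slice_from_natCast, PySem.List.slice_to_natCast]
  have hlenL : (pvRot pvLower (n : Int)).length = 26 := by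
    simp [hrotL, pv_low_len]; omega
  have hlenU : (pvRot pvUpper (n : Int)).length = 26 := by
    simp [hrotU, pv_up_len]; omega
  apply List.ext_getElem
  · simp [pvZipS, PySem.List.length_enumerate, pv_let_len, pv_low_len, pv_up_len, hlenL, hlenU]
  intro j h1 h2
  have hj52 : j < 52 := by
    simpa [PySem.List.length_enumerate, pv_let_len] using h1
  simp only [List.getElem_map, PySem.List.getElem_enumerate, pvZipS, List.getElem_zip]
  refine Prod.ext ?_ ?_
  · -- key component
    refine congrArg String.singleton ?_
    apply Option.some.inj
    rw [← List.getElem?_eq_getElem, ← List.getElem?_eq_getElem, pv_letters_split]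
  · -- value component
    refine congrArg String.singleton ?_
    apply Option.some.inj
    rw [← List.getElem?_eq_getElem]
    by_cases hj : j < 26
    · -- lowercase half
      rw [List.getElem?_append_left (by rw [hlenL]; omega), hrotL,
        pv_rot_get? pvLower pv_low_len n j hn hj, pv_low_get? _ (by omega)]
      rw [if_pos (by omega), hm]
      have hidx : ((0 : Int) + (j : Int) + (n : Int)) % 26 = (((j + n) % 26 : Nat) : Int) := by
        omega
      rw [hidx, PySem.List.pyGetD_natCast,
        List.getD_eq_getElem _ _ (by rw [pv_let_len]; omega),
        List.getElem?_eq_getElem (by rw [pv_let_len]; omega)]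
    · -- uppercase half
      rw [List.getElem?_append_right (by rw [hlenL]; omega), hlenL, hrotU,
        pv_rot_get? pvUpper pv_up_len n (j - 26) hn (by omega), pv_up_get? _ (by omega)]
      rw [if_neg (by omega), hm]
      have hidx : ((0 : Int) + (j : Int) + (n : Int)) % 26 + 26
          = ((((j - 26 + n) % 26 + 26 : Nat)) : Int) := by
        omega
      rw [hidx, PySem.List.pyGetD_natCast,
        List.getD_eq_getElem _ _ (by rw [pv_let_len]; omega),
        List.getElem?_eq_getElem (by rw [pv_let_len]; omega)]

-- ===== VERDICT (by name: the statement is the Claim_ definition above) =====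
theorem caesarKey_spec : Claim_equal_caesarKey := by
  intro shift _
  unfold Spec_caesarKey
  -- A's side as two mapped lists
  unfold caesarKey
  rw [pv_foldl_pair]
  simp only [pv_items_fold]
  -- B's side
  simp only [caesarKey_alt]
  have hs0 : 0 ≤ shift % 26 := by omega
  have hs26 : shift % 26 < 26 := by omega
  have hi0 : 0 ≤ (-shift) % 26 := by omega
  have hi26 : (-shift) % 26 < 26 := by omega
  have hseq : PySem.Int.mod shift 26 = (((shift % 26).toNat : Nat) : Int) := by
    rw [pv_mod_pos]; omega
  have hieq : PySem.Int.mod (-shift) 26 = ((((-shift) % 26).toNat : Nat) : Int) := by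
    rw [pv_mod_pos]; omega
  rw [hseq, hieq]
  simp only [pvValK, pvValI]
  refine Prod.ext ?_ ?_
  · exact pv_map_eq (fun j => j + shift) (shift % 26).toNat (by omega)
      (fun j => by simp only [pv_mod_pos]; omega)
  · exact pv_map_eq (fun j => j - shift) ((-shift) % 26).toNat (by omega)
      (fun j => by simp only [pv_mod_pos]; omega)
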